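-- pv_equiv track=rewrite | github.com/dudgns3tp/algo_JS | python/programmers/hash/SKilltree.py | solution
-- ===== SOURCE A (Python) =====
-- from collections import deque
--
-- def solution(skills_order, skill_tree):
--     skills_order_dic = {}
--     skill_tree_queue = deque(skill_tree)
--     for index, skill in enumerate(skills_order, 1):
--         skills_order_dic[skill] = index
--     pre_skill = 1
--
--     while skill_tree_queue:
--         current_skill = skill_tree_queue.popleft()
--         if skills_order_dic.get(current_skill):
--             pre_skill = skills_order_dic.get(current_skill) ==  pre_skill and pre_skill + 1 or False
--
--         if not pre_skill:
--             return False
--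
--     return True
-- ===== SOURCE B (Python) =====
-- def solution(skills_order, skill_tree):
--     required = set(skills_order)
--     pos = 0
--     for c in skill_tree:
--         if c in required:
--             if pos >= len(skills_order) or c != skills_order[pos]:
--                 return False
--             pos += 1
--     return True
-- ===== Notes on version B (the rewrite author's own statement) =====
-- stated objective: simpler
-- what changed: Drops A's index dictionary and counter entirely: B walks skill_tree with a cursor into skills_order itself, comparing each tracked character positionally against skills_order[pos]; Pre_ restricts skills_order to distinct characters (the task's natural domain), since with duplicates A's last-index-wins dict makes its verdict an accident of dict reinsertion.
-- outside the precondition, e.g. on solution('AA', 'A'): A returns False, B returns True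
import Mathlib
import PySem

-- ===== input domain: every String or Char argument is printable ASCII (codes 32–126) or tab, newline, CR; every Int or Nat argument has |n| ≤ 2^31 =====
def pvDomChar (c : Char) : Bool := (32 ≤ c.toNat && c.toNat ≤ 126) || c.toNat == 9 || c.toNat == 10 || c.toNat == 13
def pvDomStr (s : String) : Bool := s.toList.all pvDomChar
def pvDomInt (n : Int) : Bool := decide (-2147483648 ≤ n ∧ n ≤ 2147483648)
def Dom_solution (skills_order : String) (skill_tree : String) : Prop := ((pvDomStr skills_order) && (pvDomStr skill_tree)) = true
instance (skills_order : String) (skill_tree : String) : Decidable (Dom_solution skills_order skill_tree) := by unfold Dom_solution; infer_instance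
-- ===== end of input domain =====

-- B drops A's index dictionary entirely: it walks skill_tree with a cursor into
-- skills_order itself, comparing each tracked character positionally (objective: simpler).

-- ===== PORT A =====
-- the while loop over the deque; pre_skill is an Int, with 0 playing Python's False
-- (A's pre_skill is 1, then successive increments, or False; it is never the int 0)
def solutionLoopA (d : PySem.Dict Char Int) : List Char → Int → Bool
  | [], _ => true
  | c :: rest, pre =>
    let pre' :=
      match PySem.Dict.get? d c with
      | some v => if v ≠ 0 then (if v = pre then pre + 1 else 0) else pre   -- `if dic.get(c):` truthiness, then `== pre and pre+1 or False`
      | none => pre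
    if pre' = 0 then false else solutionLoopA d rest pre'

def solution (skills_order : String) (skill_tree : String) : Bool :=
  let dic := (PySem.List.enumerate skills_order.toList 1).foldl
      (fun d p => PySem.Dict.insert d p.2 p.1) PySem.Dict.empty
  solutionLoopA dic skill_tree.toList 1

-- ===== PORT B =====
-- the for loop over skill_tree: pos is the cursor into skills_order
def solutionLoopB (order : List Char) (required : PySem.Set Char) : List Char → Nat → Bool
  | [], _ => true
  | c :: rest, pos =>
    if required.contains c then
      if pos ≥ order.length ∨ order[pos]? ≠ some c then false   -- `pos >= len(skills_order) or c != skills_order[pos]`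
      else solutionLoopB order required rest (pos + 1)
    else solutionLoopB order required rest pos

def solution_alt (skills_order : String) (skill_tree : String) : Bool :=
  let required := PySem.Set.ofList skills_order.toList
  solutionLoopB skills_order.toList required skill_tree.toList 0

-- ===== PRECONDITION & SPEC =====
-- Pre_ restricts skills_order to distinct characters, the task's natural domain (a skill order
-- names each skill once); with duplicates A's last-index-wins dict makes index 1 unreachable and
-- its verdict an accident of dict reinsertion (duplicate-key corner), so nothing is claimed there.
def Pre_solution (skills_order : String) (skill_tree : String) : Prop := skills_order.toList.Nodup
instance (skills_order : String) (skill_tree : String) : Decidable (Pre_solution skills_order skill_tree) := by unfold Pre_solution; infer_instance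
def pvWitness_solution : String × String := ("CBD", "CBDA")

def Spec_solution (skills_order : String) (skill_tree : String) (out : Bool) : Prop := out = solution_alt skills_order skill_tree
instance (skills_order : String) (skill_tree : String) (out : Bool) : Decidable (Spec_solution skills_order skill_tree out) := by unfold Spec_solution; infer_instance

-- ===== CLAIM (what is proved, stated in full; the proofs are below) =====
def Claim_equal_solution : Prop := ∀ (skills_order : String) (skill_tree : String), Dom_solution skills_order skill_tree → Pre_solution skills_order skill_tree → Spec_solution skills_order skill_tree (solution skills_order skill_tree)

-- ===== LEMMAS AND PROOFS =====

-- the dict built by A's first loop, abstracted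
def buildDic (l : List Char) (s : Int) (d : PySem.Dict Char Int) : PySem.Dict Char Int :=
  (PySem.List.enumerate l s).foldl (fun d p => PySem.Dict.insert d p.2 p.1) d

theorem get?_buildDic_not_mem (l : List Char) (s : Int) (d : PySem.Dict Char Int)
    (c : Char) (hc : c ∉ l) : PySem.Dict.get? (buildDic l s d) c = PySem.Dict.get? d c := by
  induction l generalizing s d with
  | nil => simp [buildDic, PySem.List.enumerate]
  | cons x xs ih =>
    simp only [List.mem_cons, not_or] at hc
    rw [buildDic, PySem.List.enumerate_cons, List.foldl_cons]
    rw [show ∀ d', (PySem.List.enumerate xs (s+1)).foldl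
        (fun d p => PySem.Dict.insert d p.2 p.1) d' = buildDic xs (s+1) d' from fun _ => rfl]
    rw [ih (s+1) _ hc.2, PySem.Dict.get?_insert]
    simp [hc.1]

theorem get?_buildDic_mem (l : List Char) (hnd : l.Nodup) (s : Int) (d : PySem.Dict Char Int)
    (c : Char) (hc : c ∈ l) :
    PySem.Dict.get? (buildDic l s d) c = some (s + (l.idxOf c : Int)) := by
  induction l generalizing s d with
  | nil => simp at hc
  | cons x xs ih =>
    rw [buildDic, PySem.List.enumerate_cons, List.foldl_cons]
    rw [show ∀ d', (PySem.List.enumerate xs (s+1)).foldl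
        (fun d p => PySem.Dict.insert d p.2 p.1) d' = buildDic xs (s+1) d' from fun _ => rfl]
    rcases List.mem_cons.mp hc with h | h
    · subst h
      have hnx : c ∉ xs := (List.nodup_cons.mp hnd).1
      rw [get?_buildDic_not_mem xs (s+1) _ c hnx, PySem.Dict.get?_insert]
      simp [List.idxOf_cons_self]
    · have hne : c ≠ x := by
        rintro rfl; exact (List.nodup_cons.mp hnd).1 h
      rw [ih (List.nodup_cons.mp hnd).2 (s+1) _ h]
      rw [List.idxOf_cons_ne _ (by exact fun e => hne e.symm)]
      congr 1
      push_cast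
      ring

-- consecutive-run check, the common characterisation of both ports' loops
def consecFrom : Int → List Int → Bool
  | _, [] => true
  | pre, x :: xs => x = pre && consecFrom (pre + 1) xs

theorem loopA_eq_consecFrom (d : PySem.Dict Char Int)
    (hd : ∀ c v, PySem.Dict.get? d c = some v → 1 ≤ v) :
    ∀ (cs : List Char) (pre : Int), 1 ≤ pre →
    solutionLoopA d cs pre = consecFrom pre (cs.filterMap (fun c => PySem.Dict.get? d c)) := by
  intro cs
  induction cs with
  | nil => intro pre _; simp [solutionLoopA, consecFrom]
  | cons c rest ih =>
    intro pre hpre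
    rw [solutionLoopA, List.filterMap_cons]
    have h0 : ¬ pre = 0 := by omega
    cases hg : PySem.Dict.get? d c with
    | none => simpa [hg, h0] using ih pre hpre
    | some v =>
      have hv1 : 1 ≤ v := hd c v hg
      have hv : v ≠ 0 := by omega
      by_cases hvp : v = pre
      · subst hvp
        have h1 : ¬ v + 1 = 0 := by omega
        simpa [hg, hv, h1, consecFrom] using ih (v + 1) (by omega)
      · simp [hv, hvp, consecFrom]

theorem loopB_eq_consecFrom (order : List Char) (hnd : order.Nodup)
    (d : PySem.Dict Char Int)
    (hget : ∀ c, PySem.Dict.get? d c =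
      if c ∈ order then some (1 + (order.idxOf c : Int)) else none) :
    ∀ (cs : List Char) (pos : Nat),
    solutionLoopB order (PySem.Set.ofList order) cs pos =
      consecFrom ((pos : Int) + 1) (cs.filterMap (fun c => PySem.Dict.get? d c)) := by
  intro cs
  induction cs with
  | nil => intro pos; simp [solutionLoopB, consecFrom]
  | cons c rest ih =>
    intro pos
    rw [solutionLoopB, List.filterMap_cons]
    by_cases hc : c ∈ order
    · rw [if_pos (by simp; exact hc)]
      simp only [hget c, if_pos hc]
      rw [consecFrom]
      by_cases hok : pos < order.length ∧ order[pos]? = some c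
      · have hidx : order.idxOf c = pos := by
          have h1 : order[pos]'hok.1 = c := by
            have := hok.2; rwa [List.getElem?_eq_getElem hok.1, Option.some_inj] at this
          have h2 : order.idxOf c < order.length := List.idxOf_lt_length_of_mem hc
          have h3 : order[order.idxOf c]'h2 = c := List.getElem_idxOf h2
          exact hnd.getElem_inj_iff.mp (h3.trans h1.symm)
        have hcond : ¬ (pos ≥ order.length ∨ order[pos]? ≠ some c) := by
          simp only [not_or, not_le, not_not]
          exact ⟨hok.1, hok.2⟩
        rw [if_neg hcond, ih (pos + 1), hidx]
        have heq : (1 + (pos : Int)) = ((pos : Int) + 1) := by ring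
        have hcast : (((pos + 1 : Nat)) : Int) + 1 = ((pos : Int) + 1) + 1 := by push_cast; ring
        rw [heq, hcast]
        simp
      · have hcond : pos ≥ order.length ∨ order[pos]? ≠ some c := by
          rcases Nat.lt_or_ge pos order.length with hlt | hge
          · right
            intro he
            exact hok ⟨hlt, he⟩
          · left; exact hge
        rw [if_pos hcond]
        have hne : ¬ ((1 : Int) + (order.idxOf c : Int) = (pos : Int) + 1) := by
          intro he
          have hip : order.idxOf c = pos := by omega
          rcases hcond with hge | hne'
          · have := List.idxOf_lt_length_of_mem hc; omega
          · apply hne'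
            rw [← hip, List.getElem?_eq_getElem (List.idxOf_lt_length_of_mem hc),
              List.getElem_idxOf]
        simp [hne]
    · rw [if_neg (by simp; exact hc)]
      simp only [hget c, if_neg hc]
      exact ih pos

-- ===== VERDICT (by name: the statement is the Claim_ definition above) =====
theorem solution_spec : Claim_equal_solution := by
  intro skills_order skill_tree _ hpre
  unfold Spec_solution solution solution_alt
  set order := skills_order.toList with horder
  have hget : ∀ c, PySem.Dict.get? (buildDic order 1 PySem.Dict.empty) c =
      if c ∈ order then some (1 + (order.idxOf c : Int)) else none := by
    intro c
    by_cases hc : c ∈ order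
    · rw [get?_buildDic_mem order hpre 1 _ c hc, if_pos hc]
    · rw [get?_buildDic_not_mem order 1 _ c hc, if_neg hc, PySem.Dict.get?_empty]
  have hd : ∀ c v, PySem.Dict.get? (buildDic order 1 PySem.Dict.empty) c = some v → 1 ≤ v := by
    intro c v h
    rw [hget c] at h
    split at h
    · simp only [Option.some.injEq] at h; omega
    · simp at h
  show solutionLoopA (buildDic order 1 PySem.Dict.empty) skill_tree.toList 1 = _
  rw [loopA_eq_consecFrom _ hd _ 1 (by omega)]
  have := (loopB_eq_consecFrom order hpre _ hget skill_tree.toList 0).symm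
  simpa using this
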